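-- pv_equiv track=rewrite | github.com/pittcsc/New-Grad-Positions | .github/scripts/bulk_mark_inactive.py | generate_summary_comment
-- ===== SOURCE A (Python) =====
-- def generate_summary_comment(results, reason):
--     """
--     Generate a summary comment for the GitHub issue.
--     """
--     successful = [url for url, result in results.items() if result["status"] == "success"]
--     warnings = [url for url, result in results.items() if result["status"] == "warning"]
--     errors = [url for url, result in results.items() if result["status"] == "error"]
--
--     comment = f"## Bulk Mark Inactive Results\n\n"
--     comment += f"**Reason:** {reason}\n\n"
--     comment += f"**Summary:** {len(successful)} successful, {len(warnings)} warnings, {len(errors)} errors\n\n"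
--
--     if successful:
--         comment += f"### ✅ Successfully Marked Inactive ({len(successful)})\n"
--         for url in successful:
--             comment += f"- {results[url]['message']}\n"
--         comment += "\n"
--
--     if warnings:
--         comment += f"### ⚠️ Warnings ({len(warnings)})\n"
--         for url in warnings:
--             comment += f"- {results[url]['message']}\n"
--         comment += "\n"
--
--     if errors:
--         comment += f"### ❌ Errors ({len(errors)})\n"
--         for url in errors:
--             comment += f"- {results[url]['message']}\n"
--         comment += "\n"
--
--     if successful:
--         comment += "The README will be updated automatically.\n"
--
--     return comment
-- ===== SOURCE B (Python) =====
-- def generate_summary_comment(results, reason):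
--     """
--     Generate a summary comment for the GitHub issue.
--     """
--     groups = {"success": [], "warning": [], "error": []}
--     for result in results.values():
--         status = result["status"]
--         if status in groups:
--             groups[status].append(result["message"])
--
--     parts = [
--         "## Bulk Mark Inactive Results\n\n"
--         f"**Reason:** {reason}\n\n"
--         f"**Summary:** {len(groups['success'])} successful, "
--         f"{len(groups['warning'])} warnings, {len(groups['error'])} errors\n\n"
--     ]
--     sections = [
--         ("success", "### ✅ Successfully Marked Inactive"),
--         ("warning", "### ⚠️ Warnings"),
--         ("error", "### ❌ Errors"),
--     ]
--     for key, heading in sections: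
--         msgs = groups[key]
--         if msgs:
--             parts.append(f"{heading} ({len(msgs)})\n"
--                          + "".join(f"- {m}\n" for m in msgs) + "\n")
--     if groups["success"]:
--         parts.append("The README will be updated automatically.\n")
--     return "".join(parts)
-- ===== Notes on version B (the rewrite author's own statement) =====
-- stated objective: simpler
-- what changed: Replaces A's three per-status comprehensions, three copy-pasted if-blocks and per-url dict re-lookups by one grouping pass over results.values() that collects messages directly, plus a table-driven loop over (key, heading) section specs.
import Mathlib
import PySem

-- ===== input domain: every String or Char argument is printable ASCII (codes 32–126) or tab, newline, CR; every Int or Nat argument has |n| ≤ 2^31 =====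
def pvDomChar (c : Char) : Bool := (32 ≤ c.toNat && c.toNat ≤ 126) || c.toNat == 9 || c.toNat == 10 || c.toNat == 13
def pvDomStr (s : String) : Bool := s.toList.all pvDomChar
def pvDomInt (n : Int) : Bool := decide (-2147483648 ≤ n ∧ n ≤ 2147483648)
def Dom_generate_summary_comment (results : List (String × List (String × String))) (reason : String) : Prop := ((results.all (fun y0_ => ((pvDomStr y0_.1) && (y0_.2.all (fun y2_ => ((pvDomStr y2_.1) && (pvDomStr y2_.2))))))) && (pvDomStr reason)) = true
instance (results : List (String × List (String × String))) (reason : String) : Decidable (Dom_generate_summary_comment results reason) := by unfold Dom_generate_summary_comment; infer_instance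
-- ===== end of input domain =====

-- B replaces A's three per-status comprehensions plus three copied if-blocks by one grouping pass
-- over the dict values and a table-driven loop over (key, heading) section specs (objective: simpler).


-- ===== PORT A =====
-- result["status"] / result["message"] / results[url]: raising lookups; Pre_ keeps them `some`,
-- so the `.getD` defaults below are never reached inside Pre_.
def pvMsgLookup (results : List (String × List (String × String))) (url : String) : String :=
  ((PySem.Dict.mk (((PySem.Dict.mk results).get? url).getD [])).get? "message").getD ""

def generate_summary_comment (results : List (String × List (String × String))) (reason : String) : String :=
  let successful := (results.filter (fun p => (PySem.Dict.mk p.2).get? "status" == some "success")).map (fun p => p.1)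
  let warnings := (results.filter (fun p => (PySem.Dict.mk p.2).get? "status" == some "warning")).map (fun p => p.1)
  let errors := (results.filter (fun p => (PySem.Dict.mk p.2).get? "status" == some "error")).map (fun p => p.1)
  let comment := "## Bulk Mark Inactive Results\n\n"
  let comment := comment ++ "**Reason:** " ++ reason ++ "\n\n"
  let comment := comment ++ "**Summary:** " ++ PySem.Int.toStr (successful.length : Int) ++ " successful, "
      ++ PySem.Int.toStr (warnings.length : Int) ++ " warnings, "
      ++ PySem.Int.toStr (errors.length : Int) ++ " errors\n\n"
  let comment := if successful.isEmpty then comment else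
    let c := comment ++ "### ✅ Successfully Marked Inactive (" ++ PySem.Int.toStr (successful.length : Int) ++ ")\n"
    let c := successful.foldl (fun c url => c ++ "- " ++ pvMsgLookup results url ++ "\n") c
    c ++ "\n"
  let comment := if warnings.isEmpty then comment else
    let c := comment ++ "### ⚠️ Warnings (" ++ PySem.Int.toStr (warnings.length : Int) ++ ")\n"
    let c := warnings.foldl (fun c url => c ++ "- " ++ pvMsgLookup results url ++ "\n") c
    c ++ "\n"
  let comment := if errors.isEmpty then comment else
    let c := comment ++ "### ❌ Errors (" ++ PySem.Int.toStr (errors.length : Int) ++ ")\n"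
    let c := errors.foldl (fun c url => c ++ "- " ++ pvMsgLookup results url ++ "\n") c
    c ++ "\n"
  let comment := if successful.isEmpty then comment else comment ++ "The README will be updated automatically.\n"
  comment

-- ===== PORT B =====
def generate_summary_comment_alt (results : List (String × List (String × String))) (reason : String) : String :=
  let groups : PySem.Dict String (List String) := PySem.Dict.mk [("success", []), ("warning", []), ("error", [])]
  let groups := results.foldl (fun g p =>
      let status := ((PySem.Dict.mk p.2).get? "status").getD ""
      if g.contains status then
        g.modify status [] (fun ms => ms ++ [((PySem.Dict.mk p.2).get? "message").getD ""])
      else g) groups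
  let parts := ["## Bulk Mark Inactive Results\n\n**Reason:** " ++ reason ++ "\n\n**Summary:** "
      ++ PySem.Int.toStr ((groups.getD "success" []).length : Int) ++ " successful, "
      ++ PySem.Int.toStr ((groups.getD "warning" []).length : Int) ++ " warnings, "
      ++ PySem.Int.toStr ((groups.getD "error" []).length : Int) ++ " errors\n\n"]
  let sections := [("success", "### ✅ Successfully Marked Inactive"),
                   ("warning", "### ⚠️ Warnings"),
                   ("error", "### ❌ Errors")]
  let parts := sections.foldl (fun ps s =>
      let msgs := groups.getD s.1 []
      if msgs.isEmpty then ps else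
        ps ++ [s.2 ++ " (" ++ PySem.Int.toStr (msgs.length : Int) ++ ")\n"
               ++ PySem.Str.join "" (msgs.map (fun m => "- " ++ m ++ "\n")) ++ "\n"]) parts
  let parts := if (groups.getD "success" []).isEmpty then parts else parts ++ ["The README will be updated automatically.\n"]
  PySem.Str.join "" parts

-- ===== PRECONDITION & SPEC =====
-- Pre_ excludes (a) duplicate urls, which a Python dict cannot hold (A's results[url] re-lookup would be
-- ambiguous there), and (b) entries without a "status" key, or with one of the three reported statuses but
-- no "message" key — exactly the inputs on which Python A raises KeyError.
def Pre_generate_summary_comment (results : List (String × List (String × String))) (reason : String) : Prop :=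
  (results.map (fun p => p.1)).Nodup ∧
  ∀ p ∈ results, ((PySem.Dict.mk p.2).get? "status").isSome = true ∧
    (((PySem.Dict.mk p.2).get? "status").getD "" ∈ (["success", "warning", "error"] : List String) →
      ((PySem.Dict.mk p.2).get? "message").isSome = true)
instance (results : List (String × List (String × String))) (reason : String) : Decidable (Pre_generate_summary_comment results reason) := by unfold Pre_generate_summary_comment; infer_instance

def pvWitness_generate_summary_comment : (List (String × List (String × String))) × String :=
  ([("u1", [("status", "success"), ("message", "done u1")]),
    ("u2", [("status", "skip")])], "cleanup")

def Spec_generate_summary_comment (results : List (String × List (String × String))) (reason : String) (out : String) : Prop := out = generate_summary_comment_alt results reason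
instance (results : List (String × List (String × String))) (reason : String) (out : String) : Decidable (Spec_generate_summary_comment results reason out) := by unfold Spec_generate_summary_comment; infer_instance

-- ===== CLAIM (what is proved, stated in full; the proofs are below) =====
def Claim_equal_generate_summary_comment : Prop := ∀ (results : List (String × List (String × String))) (reason : String), Dom_generate_summary_comment results reason → Pre_generate_summary_comment results reason → Spec_generate_summary_comment results reason (generate_summary_comment results reason)

-- ===== LEMMAS AND PROOFS =====

-- the message list of one status group, read straight off the entries
def pvMsgs (results : List (String × List (String × String))) (k : String) : List String :=
  (results.filter (fun p => (PySem.Dict.mk p.2).get? "status" == some k)).map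
    (fun p => ((PySem.Dict.mk p.2).get? "message").getD "")

theorem pv_intersperse_nil_flatten : (L : List (List Char)) →
    (List.intersperse ([] : List Char) L).flatten = L.flatten
  | [] => by simp
  | [a] => by simp
  | a :: b :: t => by
      have h : List.intersperse ([] : List Char) (a :: b :: t)
          = a :: [] :: List.intersperse [] (b :: t) := rfl
      rw [h]
      simp [pv_intersperse_nil_flatten (b :: t)]

theorem pv_join_cons (s : String) (l : List String) :
    PySem.Str.join "" (s :: l) = s ++ PySem.Str.join "" l := by
  simp [PySem.Str.join, PySem.Chars.join, List.intercalate, pv_intersperse_nil_flatten,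
    String.ofList_append]

theorem pv_join_nil : PySem.Str.join "" ([] : List String) = "" := by decide

-- A's bullet loop is the concatenation of the bullets
theorem pv_foldl_bullets (l : List String) (g : String → String) (c : String) :
    l.foldl (fun c url => c ++ "- " ++ g url ++ "\n") c
      = c ++ PySem.Str.join "" (l.map (fun url => "- " ++ g url ++ "\n")) := by
  induction l generalizing c with
  | nil => simp [pv_join_nil]
  | cons x xs ih =>
      simp only [List.foldl_cons, List.map_cons, pv_join_cons, ih]
      simp [String.append_assoc]

-- with distinct urls, A's re-lookup of a filtered entry returns that entry's own value
theorem pv_lookup_filter (results : List (String × List (String × String)))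
    (hnd : (results.map (fun p => p.1)).Nodup) (P : String × List (String × String) → Bool)
    (p : String × List (String × String)) (hp : p ∈ results.filter P) :
    pvMsgLookup results p.1 = ((PySem.Dict.mk p.2).get? "message").getD "" := by
  have hmem : p ∈ results := (List.mem_filter.mp hp).1
  have : (PySem.Dict.mk results).get? p.1 = some p.2 := by
    apply PySem.Dict.get?_of_mem_items _ hmem
    simpa [PySem.Dict.keys] using hnd
  simp [pvMsgLookup, this]

-- B's guarded grouping loop collects exactly the messages of each pre-existing key
theorem pv_group_loop (l : List (String × List (String × String)))
    (d : PySem.Dict String (List String)) (c : String) (hc : d.contains c = true) :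
    (l.foldl (fun g p =>
      let status := ((PySem.Dict.mk p.2).get? "status").getD ""
      if g.contains status then
        g.modify status [] (fun ms => ms ++ [((PySem.Dict.mk p.2).get? "message").getD ""])
      else g) d).getD c []
    = d.getD c [] ++ (l.filter (fun p => ((PySem.Dict.mk p.2).get? "status").getD "" == c)).map
        (fun p => ((PySem.Dict.mk p.2).get? "message").getD "") := by
  induction l generalizing d with
  | nil => simp
  | cons p t ih =>
      simp only [List.foldl_cons, List.filter_cons]
      by_cases hg : d.contains (((PySem.Dict.mk p.2).get? "status").getD "") = true
      · have hc' : (d.modify (((PySem.Dict.mk p.2).get? "status").getD "") []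
            (fun ms => ms ++ [((PySem.Dict.mk p.2).get? "message").getD ""])).contains c = true := by
          rw [PySem.Dict.contains_modify]; simp [hc]
        simp only [hg, if_true]
        rw [ih _ hc', PySem.Dict.getD_modify]
        by_cases hsc : c = ((PySem.Dict.mk p.2).get? "status").getD ""
        · simp [hsc, List.append_assoc]
        · have : ((((PySem.Dict.mk p.2).get? "status").getD "") == c) = false := by
            simp; exact fun h => hsc h.symm
          simp [hsc, this]
      · have hne : ((((PySem.Dict.mk p.2).get? "status").getD "") == c) = false := by
          simp; intro h; exact hg (h ▸ hc)
        simp only [hg, if_false, Bool.false_eq_true]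
        rw [ih _ hc]
        simp [hne]

-- the two filter predicates agree for the three (nonempty) section keys
theorem pv_filter_eq (results : List (String × List (String × String))) (c : String) (hc : c ≠ "") :
    (results.filter (fun p => ((PySem.Dict.mk p.2).get? "status").getD "" == c))
      = (results.filter (fun p => (PySem.Dict.mk p.2).get? "status" == some c)) := by
  apply List.filter_congr
  intro p _
  cases h : (PySem.Dict.mk p.2).get? "status" with
  | none => simp [Ne.symm hc]
  | some s => simp

-- A's section body equals B's section body once the urls are re-resolved to their own entries
theorem pv_bullets (results : List (String × List (String × String)))
    (hnd : (results.map (fun p => p.1)).Nodup) (k : String) (c : String) :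
    ((results.filter (fun p => (PySem.Dict.mk p.2).get? "status" == some k)).map (fun p => p.1)).foldl
        (fun c url => c ++ "- " ++ pvMsgLookup results url ++ "\n") c
      = c ++ PySem.Str.join "" ((pvMsgs results k).map (fun m => "- " ++ m ++ "\n")) := by
  rw [pv_foldl_bullets]
  congr 1
  unfold pvMsgs
  rw [List.map_map, List.map_map]
  exact congrArg _ (List.map_congr_left (fun p hp => by
    simp only [Function.comp]
    rw [pv_lookup_filter results hnd _ p hp]))

-- re-associating the one literal pair the ←assoc normal form leaves split
theorem pv_summary_glue (x : String) :
    x ++ "\n\n" ++ "**Summary:** " = x ++ "\n\n**Summary:** " := by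
  rw [String.append_assoc]
  rfl

-- ===== VERDICT (by name: the statement is the Claim_ definition above) =====
theorem generate_summary_comment_spec : Claim_equal_generate_summary_comment := by
  intro results reason _hdom hpre
  obtain ⟨hnd, _hkeys⟩ := hpre
  unfold Spec_generate_summary_comment
  simp only [generate_summary_comment, generate_summary_comment_alt]
  simp only [List.foldl_cons, List.foldl_nil]
  rw [pv_group_loop results _ "success" (by decide),
      pv_group_loop results _ "warning" (by decide),
      pv_group_loop results _ "error" (by decide)]
  rw [pv_filter_eq results "success" (by decide), pv_filter_eq results "warning" (by decide),
      pv_filter_eq results "error" (by decide)]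
  rw [show (PySem.Dict.mk [("success", ([] : List String)), ("warning", []), ("error", [])]).getD "success" [] = ([] : List String) from by decide,
      show (PySem.Dict.mk [("success", ([] : List String)), ("warning", []), ("error", [])]).getD "warning" [] = ([] : List String) from by decide,
      show (PySem.Dict.mk [("success", ([] : List String)), ("warning", []), ("error", [])]).getD "error" [] = ([] : List String) from by decide]
  simp only [List.nil_append]
  rw [pv_bullets results hnd "success", pv_bullets results hnd "warning",
      pv_bullets results hnd "error"]
  rw [show "### ✅ Successfully Marked Inactive" ++ " (" = "### ✅ Successfully Marked Inactive (" from by decide,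
      show "### ⚠️ Warnings" ++ " (" = "### ⚠️ Warnings (" from by decide,
      show "### ❌ Errors" ++ " (" = "### ❌ Errors (" from by decide]
  simp only [pvMsgs, List.length_map, List.isEmpty_map]
  by_cases hS : (results.filter (fun p => (PySem.Dict.mk p.2).get? "status" == some "success")).isEmpty = true <;>
    by_cases hW : (results.filter (fun p => (PySem.Dict.mk p.2).get? "status" == some "warning")).isEmpty = true <;>
      by_cases hE : (results.filter (fun p => (PySem.Dict.mk p.2).get? "status" == some "error")).isEmpty = true <;>
        simp only [hS, hW, hE, if_true, if_false, Bool.false_eq_true] <;>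
          simp [pv_join_cons, pv_join_nil, ← String.append_assoc, String.append_empty,
            pv_summary_glue]
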